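-- pv_equiv track=rewrite | github.com/TheDarkLightX/Formal_Methods_Philosophy | experiments/math_object_innovation_v76/run_cycle.py | minimal_profile
-- ===== SOURCE A (Python) =====
-- import itertools
--
-- def sig_from_int(x: int, width: int = 4) -> tuple[int, ...]:
--     return tuple((x >> idx) & 1 for idx in reversed(range(width)))
--
-- def minimal_profile(subset):
--     signatures = [sig_from_int(value) for value in subset]
--     masks = [
--         mask
--         for size in range(1, 5)
--         for mask in itertools.combinations(range(4), size)
--     ]
--     mins = []
--     for i, signature in enumerate(signatures):
--         others = [other for j, other in enumerate(signatures) if j != i]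
--         best = None
--         for coords in masks:
--             pattern = tuple(signature[idx] for idx in coords)
--             if all(tuple(other[idx] for idx in coords) != pattern for other in others):
--                 best = len(coords)
--                 break
--         if best is None:
--             raise RuntimeError("no unique-support witness found")
--         mins.append(best)
--     return tuple(sorted(mins))
-- ===== SOURCE B (Python) =====
-- def popcount4(m):
--     return (m & 1) + ((m >> 1) & 1) + ((m >> 2) & 1) + ((m >> 3) & 1)
--
-- def minimal_profile(subset):
--     sigs = [x % 16 for x in subset]
--     mins = []
--     for i, s in enumerate(sigs):
--         diffs = [s ^ t for j, t in enumerate(sigs) if j != i]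
--         cands = [popcount4(m) for m in range(1, 16) if all(d & m for d in diffs)]
--         if not cands:
--             raise RuntimeError("no unique-support witness found")
--         mins.append(min(cands))
--     return tuple(sorted(mins))
-- ===== Notes on version B (the rewrite author's own statement) =====
-- stated objective: alternative
-- what changed: B drops the combinations-of-coordinates machinery entirely: it keeps each signature as a 4-bit integer, enumerates the 15 coordinate bitmasks 1..15, keeps those whose AND with every xor-difference is nonzero, and takes the minimum popcount, instead of A's staged size-1..4 itertools.combinations search with per-mask tuple projections and an early break.
import Mathlib
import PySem

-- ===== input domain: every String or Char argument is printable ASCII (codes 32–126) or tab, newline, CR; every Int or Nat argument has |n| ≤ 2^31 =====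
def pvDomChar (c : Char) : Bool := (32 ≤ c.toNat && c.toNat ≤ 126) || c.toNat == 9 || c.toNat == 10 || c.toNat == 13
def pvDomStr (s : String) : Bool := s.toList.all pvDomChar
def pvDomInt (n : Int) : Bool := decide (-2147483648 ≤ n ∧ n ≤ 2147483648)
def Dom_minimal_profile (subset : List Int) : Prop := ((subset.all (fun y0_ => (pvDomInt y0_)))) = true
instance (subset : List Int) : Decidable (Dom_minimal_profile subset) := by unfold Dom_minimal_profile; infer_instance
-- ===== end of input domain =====

-- B replaces A's staged combinations-of-coordinates search by bitmask arithmetic: signatures are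
-- 4-bit ints, coordinate subsets are the 15 masks 1..15, and the answer per element is the minimum
-- popcount over masks intersecting every xor-difference (objective: alternative).

-- itertools.combinations(l, k) in lexicographic order (used by Python A)
def pyCombinations : Nat → List Nat → List (List Nat)
  | 0, _ => [[]]
  | _+1, [] => []
  | k+1, a :: rest => (pyCombinations k rest).map (a :: ·) ++ pyCombinations (k+1) rest

-- ===== PORT A =====
-- sig_from_int(x): tuple((x >> idx) & 1 for idx in reversed(range(4)))
def pySig (x : Int) : List Int :=
  ((List.range 4).reverse).map (fun (idx : Nat) => PySem.Int.band (x >>> idx) 1)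

def masksA : List (List Nat) :=
  (List.range' 1 4).flatMap (fun size => pyCombinations size [0, 1, 2, 3])

-- the inner 'for coords in masks: … break' loop; indices are always in range, so getD is exact
def findA (signature : List Int) (others : List (List Int)) : List (List Nat) → Option Int
  | [] => none
  | coords :: rest =>
    let pattern := coords.map (fun idx => signature.getD idx 0)
    if others.all (fun other => decide ((coords.map fun idx => other.getD idx 0) ≠ pattern)) then
      some (coords.length : Int)
    else findA signature others rest

-- tuple(sorted(mins)) on success; the none case is Python's RuntimeError, excluded by Pre_
def finishA : Option (List Int) → List Int
  | some mins => PySem.List.sorted mins (fun v => v) false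
  | none => []

def minimal_profile (subset : List Int) : List Int :=
  let signatures := subset.map pySig
  -- others = [other for j, other in enumerate(signatures) if j != i] = signatures.eraseIdx i
  finishA (signatures.zipIdx.mapM
      (fun si => findA si.1 (signatures.eraseIdx si.2) masksA))

-- ===== PORT B =====
-- popcount4(m) = (m & 1) + ((m >> 1) & 1) + ((m >> 2) & 1) + ((m >> 3) & 1)
def popcount4 (m : Int) : Int :=
  PySem.Int.band m 1 + PySem.Int.band (m >>> (1:Nat)) 1
    + PySem.Int.band (m >>> (2:Nat)) 1 + PySem.Int.band (m >>> (3:Nat)) 1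

-- tuple(sorted(mins)) on success; the none case is Python's RuntimeError, excluded by Pre_
def finishB : Option (List Int) → List Int
  | some mins => PySem.List.sorted mins (fun v => v) false
  | none => []

def minimal_profile_alt (subset : List Int) : List Int :=
  let sigs := subset.map (fun x => PySem.Int.mod x 16)
  finishB (sigs.zipIdx.mapM (fun si =>
    let diffs := (sigs.eraseIdx si.2).map (fun t => PySem.Int.bxor si.1 t)
    let cands := ((PySem.List.pyRange 1 16 1).filter
        (fun m => diffs.all (fun d => decide (PySem.Int.band d m ≠ 0)))).map popcount4
    if cands.isEmpty then none else PySem.List.min? cands (fun v => v)))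

-- ===== PRECONDITION & SPEC =====
-- A raises RuntimeError exactly when two elements share their low 4 bits (equal signatures);
-- Pre_ excludes exactly those inputs.
def Pre_minimal_profile (subset : List Int) : Prop :=
  (subset.map (fun x => PySem.Int.mod x 16)).Nodup
instance (subset : List Int) : Decidable (Pre_minimal_profile subset) := by
  unfold Pre_minimal_profile; infer_instance
def pvWitness_minimal_profile : List Int := [0, 1, 2, 7]

def Spec_minimal_profile (subset : List Int) (out : List Int) : Prop := out = minimal_profile_alt subset
instance (subset : List Int) (out : List Int) : Decidable (Spec_minimal_profile subset out) := by unfold Spec_minimal_profile; infer_instance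

-- ===== CLAIM (what is proved, stated in full; the proofs are below) =====
def Claim_equal_minimal_profile : Prop := ∀ (subset : List Int), Dom_minimal_profile subset → Pre_minimal_profile subset → Spec_minimal_profile subset (minimal_profile subset)

-- ===== LEMMAS AND PROOFS =====

-- the signature of x as a function of its low 4 bits
def natSig (n : Nat) : List Int :=
  [((n >>> 3) % 2 : Nat), ((n >>> 2) % 2 : Nat), ((n >>> 1) % 2 : Nat), ((n % 2 : Nat) : Int)]

-- masksA's combinations paired with their bitmasks (coordinate idx ↔ bit 3-idx), in A's order
def maskPairs : List (List Nat × Nat) :=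
  [([0],8),([1],4),([2],2),([3],1),
   ([0,1],12),([0,2],10),([0,3],9),([1,2],6),([1,3],5),([2,3],3),
   ([0,1,2],14),([0,1,3],13),([0,2,3],11),([1,2,3],7),([0,1,2,3],15)]

def maskList : List Nat := maskPairs.map Prod.snd

-- one Python bit of x: a function of x % 16
theorem band_shift_mod16 (x : Int) (i : Nat) (hi : i < 4) :
    PySem.Int.band (x >>> i) 1 = ((((PySem.Int.mod x 16).toNat) >>> i % 2 : Nat) : Int) := by
  have hr : PySem.Int.mod x 16 = x % 16 := PySem.Int.mod_eq_emod_of_pos (by norm_num)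
  have hn : (0:Int) ≤ x % 16 := Int.emod_nonneg x (by norm_num)
  rw [hr, PySem.Int.band_one, PySem.Int.mod_eq_emod_of_pos (by norm_num),
    Int.shiftRight_eq_div_pow, Nat.shiftRight_eq_div_pow]
  push_cast [Int.toNat_of_nonneg hn]
  interval_cases i <;> norm_num <;> omega

theorem pySig_eq_natSig (x : Int) : pySig x = natSig ((PySem.Int.mod x 16).toNat) := by
  have hr : (List.range 4).reverse = ([3, 2, 1, 0] : List Nat) := by decide
  simp only [pySig, hr, List.map_cons, List.map_nil]
  rw [band_shift_mod16 x 3 (by norm_num), band_shift_mod16 x 2 (by norm_num),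
    band_shift_mod16 x 1 (by norm_num), band_shift_mod16 x 0 (by norm_num)]
  rfl

theorem mod16_toNat_lt (x : Int) : (PySem.Int.mod x 16).toNat < 16 := by
  have h2 := PySem.Int.mod_lt x (b:=16) (by norm_num)
  omega

theorem mod16_eq_cast (x : Int) : PySem.Int.mod x 16 = (((PySem.Int.mod x 16).toNat : Nat) : Int) := by
  have h := PySem.Int.mod_nonneg x (b:=16) (by norm_num)
  omega

-- goodness of the (combination, mask) pairs: length = popcount and the projection/xor bridge
theorem good_maskPairs : ∀ p ∈ maskPairs,
    ((p.1.length : Int) = popcount4 (p.2 : Int)) ∧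
    ∀ a b : Fin 16,
      (decide ((p.1.map fun idx => (natSig b).getD idx 0) ≠ (p.1.map fun idx => (natSig a).getD idx 0))
        = (((a.val ^^^ b.val) &&& p.2) != 0)) := by decide

theorem all_map_congr {α β : Type} (l : List α) (g : α → β) (f : β → Bool) (f' : α → Bool)
    (h : ∀ x ∈ l, f (g x) = f' x) : (l.map g).all f = l.all f' := by
  induction l with
  | nil => rfl
  | cons a t ih =>
    simp only [List.map_cons, List.all_cons, h a List.mem_cons_self,
      ih (fun x hx => h x (List.mem_cons_of_mem a hx))]

-- A's scan over combinations = find? over the paired masks, mapped through popcount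
theorem findA_eq_find? (a : Nat) (ha : a < 16) (othersN : List Nat)
    (hb : ∀ b ∈ othersN, b < 16) (pairs : List (List Nat × Nat))
    (hg : ∀ p ∈ pairs,
      ((p.1.length : Int) = popcount4 (p.2 : Int)) ∧
      ∀ a b : Fin 16,
        (decide ((p.1.map fun idx => (natSig b).getD idx 0) ≠ (p.1.map fun idx => (natSig a).getD idx 0))
          = (((a.val ^^^ b.val) &&& p.2) != 0))) :
    findA (natSig a) (othersN.map natSig) (pairs.map Prod.fst)
      = ((pairs.map Prod.snd).find?
          (fun m => othersN.all (fun b => ((a ^^^ b) &&& m) != 0))).map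
          (fun m : Nat => popcount4 (m : Int)) := by
  induction pairs with
  | nil => rfl
  | cons p rest ih =>
    obtain ⟨hlen, hbit⟩ := hg p List.mem_cons_self
    have hcond :
        ((othersN.map natSig).all (fun other =>
          decide ((p.1.map fun idx => other.getD idx 0) ≠ (p.1.map fun idx => (natSig a).getD idx 0))))
        = othersN.all (fun b => ((a ^^^ b) &&& p.2) != 0) := by
      apply all_map_congr
      intro b hbmem
      exact hbit ⟨a, ha⟩ ⟨b, hb b hbmem⟩
    rw [List.map_cons, List.map_cons]
    show (if ((othersN.map natSig).all _) = true then some ((p.1.length : Int)) else _) = _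
    rw [hcond, hlen]
    by_cases h : (othersN.all (fun b => ((a ^^^ b) &&& p.2) != 0)) = true
    · rw [if_pos h,
        List.find?_cons_of_pos (p := fun m => othersN.all (fun b => ((a ^^^ b) &&& m) != 0)) h]
      rfl
    · rw [if_neg h,
        List.find?_cons_of_neg (p := fun m => othersN.all (fun b => ((a ^^^ b) &&& m) != 0))
          (by simpa using h),
        ih (fun q hq => hg q (List.mem_cons_of_mem p hq))]

theorem maskList_perm : maskList.Perm (List.range' 1 15) := by decide

theorem mem_maskList_iff (m : Nat) : m ∈ maskList ↔ m ∈ List.range' 1 15 :=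
  maskList_perm.mem_iff

theorem pairwise_maskList :
    maskList.Pairwise (fun u v : Nat => popcount4 (u : Int) ≤ popcount4 (v : Int)) := by decide

-- popcount-ordered first hit = min popcount over all hitting masks of 1..15
theorem find?_eq_min (hit : Nat → Bool) :
    ((maskList.find? hit).map (fun m : Nat => popcount4 (m : Int)))
      = (if ((List.range' 1 15).filter hit).isEmpty then none
         else PySem.List.min? (((List.range' 1 15).filter hit).map (fun m : Nat => popcount4 (m : Int)))
                (fun v => v)) := by
  cases hfind : maskList.find? hit with
  | none =>
    have hnone : ∀ m ∈ maskList, ¬ hit m := by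
      intro m hm hmh
      exact absurd hfind (by simp [List.find?_eq_none]; exact ⟨m, hm, hmh⟩)
    have : (List.range' 1 15).filter hit = [] := by
      apply List.filter_eq_nil_iff.mpr
      intro m hm
      exact hnone m ((mem_maskList_iff m).mpr hm)
    simp [this]
  | some m0 =>
    have hm0 : hit m0 := List.find?_some hfind
    have hmem : m0 ∈ maskList := List.mem_of_find?_eq_some hfind
    obtain ⟨as, bs, hsplit, hprefix⟩ := List.find?_eq_some_iff_append.mp hfind |>.2
    have hm0f : m0 ∈ (List.range' 1 15).filter hit := by
      rw [List.mem_filter]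
      exact ⟨(mem_maskList_iff m0).mp hmem, hm0⟩
    have hne : (List.range' 1 15).filter hit ≠ [] := List.ne_nil_of_mem hm0f
    -- minimality of popcount4 m0 among all hitting masks
    have hminimal : ∀ m ∈ (List.range' 1 15).filter hit, popcount4 ((m0:Nat):Int) ≤ popcount4 ((m:Nat):Int) := by
      intro m hm
      obtain ⟨hmr, hmh⟩ := List.mem_filter.mp hm
      have hmml : m ∈ maskList := (mem_maskList_iff m).mpr hmr
      rw [hsplit] at hmml
      have hpw := pairwise_maskList
      rw [hsplit, List.pairwise_append] at hpw
      rcases List.mem_append.mp hmml with hA | hB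
      · exact absurd hmh (by simpa using hprefix m hA)
      · rcases List.mem_cons.mp hB with rfl | hB
        · exact le_refl _
        · exact (List.pairwise_cons.mp hpw.2.1).1 m hB
    cases hmin : PySem.List.min? (((List.range' 1 15).filter hit).map (fun m : Nat => popcount4 (m : Int)))
        (fun v => v) with
    | none =>
      exact absurd hmin (by simp [PySem.List.min?_eq_none_iff]; simpa using hne)
    | some v =>
      have hvmem := PySem.List.min?_mem hmin
      have hvmin := PySem.List.min?_isMin hmin
      obtain ⟨m', hm', rfl⟩ := List.mem_map.mp hvmem
      have h1 : popcount4 ((m':Nat):Int) ≤ popcount4 ((m0:Nat):Int) :=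
        hvmin _ (List.mem_map.mpr ⟨m0, hm0f, rfl⟩)
      have h2 : popcount4 ((m0:Nat):Int) ≤ popcount4 ((m':Nat):Int) := hminimal m' hm'
      rw [if_neg (by simpa using hne), Option.map_some]
      exact congrArg some (by omega)

theorem masksA_eq : masksA = maskPairs.map Prod.fst := by decide

theorem pyRange_1_16 : PySem.List.pyRange 1 16 1 = (List.range' 1 15).map (Nat.cast) := by decide

-- the per-element bodies agree
theorem body_eq (x : Int) (others : List Int) :
    findA (pySig x) (others.map pySig) masksA
      = (let diffs := (others.map (fun t => PySem.Int.mod t 16)).map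
            (fun t => PySem.Int.bxor (PySem.Int.mod x 16) t)
         let cands := ((PySem.List.pyRange 1 16 1).filter
            (fun m => diffs.all (fun d => decide (PySem.Int.band d m ≠ 0)))).map popcount4
         if cands.isEmpty then none else PySem.List.min? cands (fun v => v)) := by
  have ha := mod16_toNat_lt x
  set a := (PySem.Int.mod x 16).toNat with hadef
  set othersN := others.map (fun t => (PySem.Int.mod t 16).toNat) with hON
  have hb : ∀ b ∈ othersN, b < 16 := by
    intro b hbm
    rw [hON] at hbm
    obtain ⟨t, _, rfl⟩ := List.mem_map.mp hbm
    exact mod16_toNat_lt t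
  -- A side
  have hmapsig : others.map pySig = othersN.map natSig := by
    rw [hON, List.map_map]
    exact List.map_congr_left (fun t _ => pySig_eq_natSig t)
  rw [pySig_eq_natSig, hmapsig, masksA_eq,
    findA_eq_find? a ha othersN hb maskPairs good_maskPairs]
  -- B side
  have hdiffs : (others.map (fun t => PySem.Int.mod t 16)).map
      (fun t => PySem.Int.bxor (PySem.Int.mod x 16) t)
      = othersN.map (fun b => (((a ^^^ b : Nat)) : Int)) := by
    rw [hON, List.map_map, List.map_map]
    apply List.map_congr_left
    intro t _
    show PySem.Int.bxor (PySem.Int.mod x 16) (PySem.Int.mod t 16) = _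
    rw [mod16_eq_cast x, mod16_eq_cast t, PySem.Int.bxor_natCast]
    rfl
  show _ = (if (((PySem.List.pyRange 1 16 1).filter
      (fun m => ((others.map (fun t => PySem.Int.mod t 16)).map
          (fun t => PySem.Int.bxor (PySem.Int.mod x 16) t)).all
        (fun d => decide (PySem.Int.band d m ≠ 0)))).map popcount4).isEmpty then none
    else PySem.List.min? (((PySem.List.pyRange 1 16 1).filter
      (fun m => ((others.map (fun t => PySem.Int.mod t 16)).map
          (fun t => PySem.Int.bxor (PySem.Int.mod x 16) t)).all
        (fun d => decide (PySem.Int.band d m ≠ 0)))).map popcount4) (fun v => v))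
  rw [hdiffs, pyRange_1_16, List.filter_map]
  have hpred : ∀ m : Nat,
      ((fun m => (othersN.map (fun b => (((a ^^^ b : Nat)) : Int))).all
          (fun d => decide (PySem.Int.band d m ≠ 0))) ∘ (Nat.cast : Nat → Int)) m
        = (fun m => othersN.all (fun b => ((a ^^^ b) &&& m) != 0)) m := by
    intro m
    apply all_map_congr
    intro b _
    rw [PySem.Int.band_natCast]
    by_cases hz : ((a ^^^ b) &&& m) = 0 <;> simp [hz, bne]
  rw [List.filter_congr (fun m _ => hpred m), List.map_map]
  have hml : maskPairs.map Prod.snd = maskList := rfl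
  rw [hml, find?_eq_min]
  simp only [Function.comp_def]
  rw [List.isEmpty_map]

theorem mapM_map_opt {α β γ : Type} (l : List α) (g : α → β) (f : β → Option γ) :
    (l.map g).mapM f = l.mapM (fun x => f (g x)) := by
  induction l with
  | nil => rfl
  | cons a t ih => simp [List.mapM_cons, ih]

theorem finish_eq : ∀ o : Option (List Int), finishA o = finishB o := by
  intro o; cases o <;> rfl

-- ===== VERDICT (by name: the statement is the Claim_ definition above) =====
theorem minimal_profile_spec : Claim_equal_minimal_profile := by
  intro subset _ _
  show minimal_profile subset = minimal_profile_alt subset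
  show finishA ((subset.map pySig).zipIdx.mapM
      (fun si => findA si.1 ((subset.map pySig).eraseIdx si.2) masksA))
    = finishB ((subset.map (fun x => PySem.Int.mod x 16)).zipIdx.mapM
      (fun si =>
        let diffs := ((subset.map (fun x => PySem.Int.mod x 16)).eraseIdx si.2).map
            (fun t => PySem.Int.bxor si.1 t)
        let cands := ((PySem.List.pyRange 1 16 1).filter
            (fun m => diffs.all (fun d => decide (PySem.Int.band d m ≠ 0)))).map popcount4
        if cands.isEmpty then none else PySem.List.min? cands (fun v => v)))
  rw [List.zipIdx_map, List.zipIdx_map (f := fun x => PySem.Int.mod x 16),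
    mapM_map_opt, mapM_map_opt]
  simp only [Prod.map_fst, Prod.map_snd, id_eq]
  have hfun : ∀ p : Int × Nat,
      findA (pySig p.1) ((subset.map pySig).eraseIdx p.2) masksA
        = (let diffs := ((subset.map (fun x => PySem.Int.mod x 16)).eraseIdx p.2).map
              (fun t => PySem.Int.bxor (PySem.Int.mod p.1 16) t)
           let cands := ((PySem.List.pyRange 1 16 1).filter
              (fun m => diffs.all (fun d => decide (PySem.Int.band d m ≠ 0)))).map popcount4
           if cands.isEmpty then none else PySem.List.min? cands (fun v => v)) := by
    intro p
    rw [List.eraseIdx_map, List.eraseIdx_map]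
    exact body_eq p.1 (subset.eraseIdx p.2)
  rw [funext hfun]
  exact finish_eq _
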